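-- pv_equiv track=rewrite | github.com/ikibalin/cryspy | library_calc/read_rcif.py | lines_in_block
-- ===== SOURCE A (Python) =====
-- def lines_in_block(label, lcontent):
--     lnumb_p = [ihh for ihh, hh in enumerate(lcontent) if hh.startswith(label)]
--     if len(lnumb_p) > 1:
--         lnumb_b = lnumb_p
--         lnumb_e = [hh for hh in lnumb_p[1:]]
--         lnumb_e.append(len(lcontent))
--     elif len(lnumb_p) == 1:
--         lnumb_b = lnumb_p
--         lnumb_e = [len(lcontent)]
--     else:
--         return [], [], []
--     lname = [lcontent[numb_b][len(label):].strip() for numb_b in lnumb_b]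
--     lcont = [lcontent[(numb_b + 1):numb_e] for numb_b, numb_e in zip(lnumb_b, lnumb_e)]
--     return lcont, lname, lnumb_b
-- ===== SOURCE B (Python) =====
-- def lines_in_block(label, lcontent):
--     # single forward pass: open a new block at each label line, append other
--     # lines to the currently open block (lines before the first label are dropped)
--     lcont, lname, lnumb_b = [], [], []
--     cur = None
--     for i, line in enumerate(lcontent):
--         if line.startswith(label):
--             if cur is not None:
--                 lcont.append(cur)
--             cur = []
--             lname.append(line[len(label):].strip())
--             lnumb_b.append(i)
--         elif cur is not None:
--             cur.append(line)
--     if cur is None: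
--         return [], [], []
--     lcont.append(cur)
--     return lcont, lname, lnumb_b
-- ===== Notes on version B (the rewrite author's own statement) =====
-- stated objective: alternative
-- what changed: B replaces A's 'collect all label-line indices, then slice lcontent between consecutive indices' scheme with a single incremental pass that opens a new block at each label line and appends every other line to the currently open block.
import Mathlib
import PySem

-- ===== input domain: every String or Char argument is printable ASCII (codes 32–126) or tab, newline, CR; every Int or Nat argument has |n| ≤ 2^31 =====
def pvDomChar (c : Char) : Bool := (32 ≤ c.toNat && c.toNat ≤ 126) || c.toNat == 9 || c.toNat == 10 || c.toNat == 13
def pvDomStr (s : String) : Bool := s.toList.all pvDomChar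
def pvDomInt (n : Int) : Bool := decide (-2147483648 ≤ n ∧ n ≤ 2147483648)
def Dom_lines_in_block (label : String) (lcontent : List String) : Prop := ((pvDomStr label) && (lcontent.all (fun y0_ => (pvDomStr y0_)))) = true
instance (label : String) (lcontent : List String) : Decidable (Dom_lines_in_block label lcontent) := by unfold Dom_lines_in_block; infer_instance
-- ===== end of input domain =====

-- B replaces A's "collect all label indices, then slice between consecutive indices"
-- with a single incremental pass that accumulates into the currently open block (objective: alternative).

-- ===== PORT A =====
-- helper: the comprehension [ihh for ihh, hh in enumerate(lcontent) if hh.startswith(label)]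
-- (generalised over the enumeration start index for the proofs; A uses start 0)
def aPositions (label : String) (t : List String) (i : Int) : List Int :=
  ((PySem.List.enumerate t i).filter (fun p => PySem.Str.startswith p.2 label)).map (fun p => p.1)

def lines_in_block (label : String) (lcontent : List String) :
    List (List String) × List String × List Int :=
  let lnumb_p := aPositions label lcontent 0
  if lnumb_p.length > 1 then
    let lnumb_b := lnumb_p
    let lnumb_e := (PySem.List.slice lnumb_p (some 1) none) ++ [(lcontent.length : Int)]
    let lname := lnumb_b.map (fun numb_b =>
      PySem.Str.strip (PySem.Str.slice (PySem.List.pyGetD lcontent numb_b "")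
        (some (PySem.Str.len label)) none))
    let lcont := (lnumb_b.zip lnumb_e).map (fun be =>
      PySem.List.slice lcontent (some (be.1 + 1)) (some be.2))
    (lcont, lname, lnumb_b)
  else if lnumb_p.length = 1 then
    let lnumb_b := lnumb_p
    let lnumb_e := [(lcontent.length : Int)]
    let lname := lnumb_b.map (fun numb_b =>
      PySem.Str.strip (PySem.Str.slice (PySem.List.pyGetD lcontent numb_b "")
        (some (PySem.Str.len label)) none))
    let lcont := (lnumb_b.zip lnumb_e).map (fun be =>
      PySem.List.slice lcontent (some (be.1 + 1)) (some be.2))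
    (lcont, lname, lnumb_b)
  else ([], [], [])

-- ===== PORT B =====
-- state: (lcont, lname, lnumb_b, cur); cur = none means no block is open yet
def altStep (label : String)
    (st : List (List String) × List String × List Int × Option (List String))
    (p : Int × String) :
    List (List String) × List String × List Int × Option (List String) :=
  let (lcont, lname, lnumb, cur) := st
  if PySem.Str.startswith p.2 label then
    ((match cur with | none => lcont | some c => lcont ++ [c]),
     lname ++ [PySem.Str.strip (PySem.Str.slice p.2 (some (PySem.Str.len label)) none)],
     lnumb ++ [p.1], some [])
  else
    match cur with
    | none => st
    | some c => (lcont, lname, lnumb, some (c ++ [p.2]))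

-- the "if cur is None: return [],[],[] / lcont.append(cur); return" postlude
def altClose (st : List (List String) × List String × List Int × Option (List String)) :
    List (List String) × List String × List Int :=
  match st with
  | (_, _, _, none) => ([], [], [])
  | (lcont, lname, lnumb, some c) => (lcont ++ [c], lname, lnumb)

def lines_in_block_alt (label : String) (lcontent : List String) :
    List (List String) × List String × List Int :=
  altClose ((PySem.List.enumerate lcontent 0).foldl (altStep label) ([], [], [], none))

-- ===== PRECONDITION & SPEC =====
def Spec_lines_in_block (label : String) (lcontent : List String) (out : List (List String) × List String × List Int) : Prop := out = lines_in_block_alt label lcontent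
instance (label : String) (lcontent : List String) (out : List (List String) × List String × List Int) : Decidable (Spec_lines_in_block label lcontent out) := by unfold Spec_lines_in_block; infer_instance

-- ===== CLAIM (what is proved, stated in full; the proofs are below) =====
def Claim_equal_lines_in_block : Prop := ∀ (label : String) (lcontent : List String), Dom_lines_in_block label lcontent → Spec_lines_in_block label lcontent (lines_in_block label lcontent)

-- ===== LEMMAS AND PROOFS =====

-- common reference function: structural recursion over the lines, absolute index i
def go (label : String) : List String → Int → List (List String) × List String × List Int
  | [], _ => ([], [], [])
  | h :: t, i =>
    let r := go label t (i + 1)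
    if PySem.Str.startswith h label then
      (t.takeWhile (fun l => !PySem.Str.startswith l label) :: r.1,
       PySem.Str.strip (PySem.Str.slice h (some (PySem.Str.len label)) none) :: r.2.1,
       i :: r.2.2)
    else r


-- B side: running the fold with an open block c collected so far
theorem foldl_altStep_some (label : String) :
    ∀ (t : List String) (i : Int) (lc : List (List String)) (ln : List String)
      (lb : List Int) (c : List String),
    altClose ((PySem.List.enumerate t i).foldl (altStep label) (lc, ln, lb, some c))
      = (lc ++ (c ++ t.takeWhile (fun l => !PySem.Str.startswith l label)) :: (go label t i).1,
         ln ++ (go label t i).2.1, lb ++ (go label t i).2.2)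
  | [], i, lc, ln, lb, c => by
    simp [PySem.List.enumerate, altClose, go]
  | h :: t, i, lc, ln, lb, c => by
    rw [PySem.List.enumerate_cons, List.foldl_cons]
    by_cases hs : PySem.Str.startswith h label
    · have hs' : PySem.Chars.startswith h.toList label.toList = true := by simpa using hs
      simp only [altStep]; rw [if_pos hs]
      rw [foldl_altStep_some label t (i + 1)]
      simp [go, hs', List.takeWhile]
    · have hs' : PySem.Chars.startswith h.toList label.toList = false := by simpa using hs
      simp only [altStep]; rw [if_neg hs]
      rw [foldl_altStep_some label t (i + 1)]
      simp [go, hs', List.takeWhile]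

-- B side: the whole fold from the initial (no open block) state computes go
theorem alt_eq_go (label : String) :
    ∀ (t : List String) (i : Int),
    altClose ((PySem.List.enumerate t i).foldl (altStep label) ([], [], [], none))
      = go label t i
  | [], i => by simp [PySem.List.enumerate, altClose, go]
  | h :: t, i => by
    rw [PySem.List.enumerate_cons, List.foldl_cons]
    by_cases hs : PySem.Str.startswith h label
    · have hs' : PySem.Chars.startswith h.toList label.toList = true := by simpa using hs
      simp only [altStep]; rw [if_pos hs]
      rw [foldl_altStep_some label t (i + 1)]
      simp [go, hs']
    · have hs' : PySem.Chars.startswith h.toList label.toList = false := by simpa using hs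
      simp only [altStep]; rw [if_neg hs]
      rw [alt_eq_go label t (i + 1)]
      simp [go, hs']

-- A side: unfolding lemmas for the positions list
theorem pos_nil (label : String) (i : Int) : aPositions label [] i = [] := by
  simp [aPositions, PySem.List.enumerate]

theorem pos_cons (label : String) (h : String) (t : List String) (i : Int) :
    aPositions label (h :: t) i
      = if PySem.Str.startswith h label then i :: aPositions label t (i + 1)
        else aPositions label t (i + 1) := by
  by_cases hs : PySem.Str.startswith h label
  · have hs' : PySem.Chars.startswith h.toList label.toList = true := by simpa using hs
    rw [if_pos hs]
    simp [aPositions, PySem.List.enumerate_cons, hs']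
  · rw [if_neg hs]
    have hs' : PySem.Chars.startswith h.toList label.toList = false := by simpa using hs
    simp [aPositions, PySem.List.enumerate_cons, hs']

theorem pos_lb (label : String) :
    ∀ (t : List String) (i b : Int), b ∈ aPositions label t i → i ≤ b
  | [], i, b => by simp [pos_nil]
  | h :: t, i, b => by
    rw [pos_cons]
    split_ifs with hs
    · intro hb
      rcases List.mem_cons.1 hb with rfl | hb
      · exact le_refl _
      · have := pos_lb label t (i + 1) b hb; omega
    · intro hb
      have := pos_lb label t (i + 1) b hb; omega

theorem pos_nil_takeWhile (label : String) :
    ∀ (t : List String) (i : Int), aPositions label t i = [] →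
    t.takeWhile (fun l => !PySem.Str.startswith l label) = t
  | [], i, _ => rfl
  | h :: t, i, hp => by
    rw [pos_cons] at hp
    by_cases hs : PySem.Str.startswith h label
    · rw [if_pos hs] at hp; exact absurd hp (List.cons_ne_nil _ _)
    · rw [if_neg hs] at hp
      have hs' : PySem.Chars.startswith h.toList label.toList = false := by simpa using hs
      have ht := pos_nil_takeWhile label t (i + 1) hp
      simp only [PySem.Str.startswith_eq] at ht
      simp [hs', ht]

theorem pos_head (label : String) :
    ∀ (t : List String) (i b : Int) (ps : List Int), aPositions label t i = b :: ps →
    b = i + ((t.takeWhile (fun l => !PySem.Str.startswith l label)).length : Int)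
  | [], i, b, ps => by simp [pos_nil]
  | h :: t, i, b, ps => by
    rw [pos_cons]
    by_cases hs : PySem.Str.startswith h label
    · rw [if_pos hs]
      intro hp
      injection hp with h1 h2
      have hs' : PySem.Chars.startswith h.toList label.toList = true := by simpa using hs
      simp [List.takeWhile, hs', ← h1]
    · rw [if_neg hs]
      intro hp
      have hrec := pos_head label t (i + 1) b ps hp
      have hs' : PySem.Chars.startswith h.toList label.toList = false := by simpa using hs
      simp only [PySem.Str.startswith_eq] at hrec ⊢
      simp [List.takeWhile, hs'] at hrec ⊢
      omega

-- slicing / indexing a cons cell with positive bounds shifts to the tail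
theorem slice_cons_shift (x : String) (xs : List String) (a b : Int)
    (ha : 1 ≤ a) (hb : 1 ≤ b) :
    PySem.List.slice (x :: xs) (some a) (some b)
      = PySem.List.slice xs (some (a - 1)) (some (b - 1)) := by
  rw [PySem.List.slice_toNat _ (by omega) (by omega),
      PySem.List.slice_toNat _ (by omega) (by omega)]
  have h1 : a.toNat = (a - 1).toNat + 1 := by omega
  rw [h1, List.drop_succ_cons]
  congr 1
  omega

theorem pyGetD_cons_shift (x : String) (xs : List String) (j : Int) (d : String)
    (hj : 1 ≤ j) :
    PySem.List.pyGetD (x :: xs) j d = PySem.List.pyGetD xs (j - 1) d := by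
  unfold PySem.List.pyGetD
  rw [PySem.List.pyGet?_of_nonneg _ (by omega), PySem.List.pyGet?_of_nonneg _ (by omega)]
  have h1 : j.toNat = (j - 1).toNat + 1 := by omega
  rw [h1]
  simp

theorem take_length_takeWhile {α : Type} (p : α → Bool) :
    ∀ (t : List α), t.take (t.takeWhile p).length = t.takeWhile p
  | [] => rfl
  | h :: t => by
    by_cases hp : p h
    · simp [List.takeWhile, hp, take_length_takeWhile p t]
    · simp [List.takeWhile, hp]

-- shifting the block slices / the name lookups from (h :: t) at offset i to t at offset i+1
theorem shift_cont (_label h : String) (t : List String) (i : Int) (bs es : List Int)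
    (hb : ∀ b ∈ bs, i + 1 ≤ b) (he : ∀ e ∈ es, i + 1 ≤ e) :
    (bs.zip es).map (fun be => PySem.List.slice (h :: t) (some (be.1 + 1 - i)) (some (be.2 - i)))
      = (bs.zip es).map (fun be => PySem.List.slice t (some (be.1 + 1 - (i + 1))) (some (be.2 - (i + 1)))) := by
  apply List.map_congr_left
  intro be hbe
  obtain ⟨h1, h2⟩ := List.of_mem_zip hbe
  rw [slice_cons_shift _ _ _ _ (by have := hb _ h1; omega) (by have := he _ h2; omega)]
  have e1 : be.1 + 1 - i - 1 = be.1 + 1 - (i + 1) := by ring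
  have e2 : be.2 - i - 1 = be.2 - (i + 1) := by ring
  rw [e1, e2]

theorem shift_name (label h : String) (t : List String) (i : Int) (bs : List Int)
    (hb : ∀ b ∈ bs, i + 1 ≤ b) :
    bs.map (fun n => PySem.Str.strip (PySem.Str.slice (PySem.List.pyGetD (h :: t) (n - i) "")
        (some (PySem.Str.len label)) none))
      = bs.map (fun n => PySem.Str.strip (PySem.Str.slice (PySem.List.pyGetD t (n - (i + 1)) "")
        (some (PySem.Str.len label)) none)) := by
  apply List.map_congr_left
  intro n hn
  rw [pyGetD_cons_shift _ _ _ _ (by have := hb _ hn; omega)]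
  have e1 : n - i - 1 = n - (i + 1) := by ring
  rw [e1]

-- arel: port A's computation generalised to an enumeration starting at index i
def arel (label : String) (t : List String) (i : Int) :
    List (List String) × List String × List Int :=
  match aPositions label t i with
  | [] => ([], [], [])
  | b :: ps =>
    let es := ps ++ [i + (t.length : Int)]
    (((b :: ps).zip es).map (fun be =>
        PySem.List.slice t (some (be.1 + 1 - i)) (some (be.2 - i))),
     (b :: ps).map (fun numb => PySem.Str.strip (PySem.Str.slice
        (PySem.List.pyGetD t (numb - i) "") (some (PySem.Str.len label)) none)),
     b :: ps)

theorem A_eq_arel (label : String) (lcontent : List String) :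
    lines_in_block label lcontent = arel label lcontent 0 := by
  unfold lines_in_block arel
  rcases h : aPositions label lcontent 0 with _ | ⟨b, _ | ⟨b2, rest⟩⟩ <;>
    simp [PySem.List.slice_from_one]

theorem arel_eq_go (label : String) :
    ∀ (t : List String) (i : Int), arel label t i = go label t i
  | [], i => by simp [arel, pos_nil, go]
  | h :: t, i => by
    have ih := arel_eq_go label t (i + 1)
    by_cases hs : PySem.Str.startswith h label
    · -- h opens a block
      rcases hp : aPositions label t (i + 1) with _ | ⟨b, ps⟩
      · -- no later label: a single block consisting of the whole tail
        have htw := pos_nil_takeWhile label t (i + 1) hp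
        have hgo : go label t (i + 1) = ([], [], []) := by rw [← ih]; simp [arel, hp]
        simp only [go, hgo]
        rw [if_pos hs]
        unfold arel
        rw [pos_cons, if_pos hs, hp]
        have e1 : i + 1 - i = (1 : Int) := by ring
        have e2 : i + (((h :: t).length : Int)) - i = (t.length : Int) + 1 := by
          push_cast [List.length_cons]; ring
        simp only [List.zip_cons_cons, List.zip_nil_left, List.map_cons, List.map_nil,
          List.nil_append, e1, e2]
        have c1 : PySem.List.slice (h :: t) (some 1) (some ((t.length : Int) + 1))
            = List.takeWhile (fun l => !PySem.Str.startswith l label) t := by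
          rw [slice_cons_shift _ _ _ _ (by omega) (by omega)]
          have e3 : ((t.length : Int) + 1 - 1) = ((t.length : Nat) : Int) := by ring
          have e4 : ((1 : Int) - 1) = (((0 : Nat) : Nat) : Int) := by norm_num
          rw [e3, e4, PySem.List.slice_natCast]
          simp only [PySem.Str.startswith_eq] at htw
          simp [htw]
        have c2 : PySem.List.pyGetD (h :: t) (i - i) "" = h := by
          have e4 : i - i = (0 : Int) := by ring
          rw [e4, PySem.List.pyGetD_zero_cons]
        rw [c1, c2]
      · -- there are later labels: first block ends at the next one
        have hpos : aPositions label (h :: t) i = i :: b :: ps := by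
          rw [pos_cons, if_pos hs, hp]
        have hhead := pos_head label t (i + 1) b ps hp
        have hblemma : ∀ x ∈ (b :: ps), i + 1 ≤ x := fun x hx =>
          pos_lb label t (i + 1) x (hp ▸ hx)
        have helemma : ∀ e ∈ ps ++ [(i + 1) + (t.length : Int)], i + 1 ≤ e := by
          intro e hepos
          rcases List.mem_append.1 hepos with h1 | h1
          · exact hblemma e (List.mem_cons_of_mem _ h1)
          · have h2 : e = (i + 1) + (t.length : Int) := by simpa using h1
            have h3 : (0 : Int) ≤ (t.length : Int) := Int.natCast_nonneg _
            omega
        have e2 : i + (((h :: t).length : Int)) = (i + 1) + (t.length : Int) := by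
          push_cast [List.length_cons]; ring
        simp only [go]
        rw [if_pos hs, ← ih]
        unfold arel
        rw [hpos, hp]
        simp only [e2, List.cons_append, List.zip_cons_cons, List.map_cons]
        rw [shift_cont label h t i _ _ hblemma helemma]
        have hb1 : i + 1 ≤ b := hblemma b (List.mem_cons_self)
        rw [pyGetD_cons_shift h t (b - i) "" (by omega)]
        have e5 : b - i - 1 = b - (i + 1) := by ring
        rw [e5, shift_name label h t i ps (fun x hx => hblemma x (List.mem_cons_of_mem _ hx))]
        have c1 : PySem.List.slice (h :: t) (some (i + 1 - i)) (some (b - i))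
            = List.takeWhile (fun l => !PySem.Str.startswith l label) t := by
          rw [slice_cons_shift _ _ _ _ (by omega) (by omega)]
          have e3 : b - i - 1
              = (((t.takeWhile (fun l => !PySem.Str.startswith l label)).length : Nat) : Int) := by
            omega
          have e4 : (i + 1 - i - 1) = (((0 : Nat) : Nat) : Int) := by norm_num
          rw [e3, e4, PySem.List.slice_natCast]
          simp [take_length_takeWhile]
        have c2 : PySem.List.pyGetD (h :: t) (i - i) "" = h := by
          have e4 : i - i = (0 : Int) := by ring
          rw [e4, PySem.List.pyGetD_zero_cons]
        rw [c1, c2]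
    · -- h does not open a block
      rcases hp : aPositions label t (i + 1) with _ | ⟨b, ps⟩
      · have hnil : aPositions label (h :: t) i = [] := by rw [pos_cons, if_neg hs, hp]
        have hs' : PySem.Chars.startswith h.toList label.toList = false := by simpa using hs
        simp [arel, hnil, go, hs', ← ih, hp]
      · have hpos : aPositions label (h :: t) i = b :: ps := by
          rw [pos_cons, if_neg hs, hp]
        have hblemma : ∀ x ∈ (b :: ps), i + 1 ≤ x := fun x hx =>
          pos_lb label t (i + 1) x (hp ▸ hx)
        have helemma : ∀ e ∈ ps ++ [(i + 1) + (t.length : Int)], i + 1 ≤ e := by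
          intro e hepos
          rcases List.mem_append.1 hepos with h1 | h1
          · exact hblemma e (List.mem_cons_of_mem _ h1)
          · have h2 : e = (i + 1) + (t.length : Int) := by simpa using h1
            have h3 : (0 : Int) ≤ (t.length : Int) := Int.natCast_nonneg _
            omega
        have e2 : i + (((h :: t).length : Int)) = (i + 1) + (t.length : Int) := by
          push_cast [List.length_cons]; ring
        simp only [go]
        rw [if_neg hs, ← ih]
        unfold arel
        rw [hpos, hp]
        simp only [e2]
        rw [shift_cont label h t i _ _ hblemma helemma,
            shift_name label h t i _ hblemma]

-- ===== VERDICT (by name: the statement is the Claim_ definition above) =====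
theorem lines_in_block_spec : Claim_equal_lines_in_block := by
  intro label lcontent _
  unfold Spec_lines_in_block lines_in_block_alt
  rw [A_eq_arel, arel_eq_go, alt_eq_go]
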